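-- pv_equiv track=rewrite | github.com/bbglab/boostdm-pipeline | containers_build/boostdm/passengers.py | get_triplet_sequence
-- ===== SOURCE A (Python) =====
-- def get_triplet_sequence(segments):
--
--     # Takes segments and returns single sequence of triplet indices
--     sequence = []
--     for seg in segments:
--         for i, c in enumerate(seg[1: -1]):
--             triplet = seg[i: i+3]
--             tset = set(triplet)
--             if not tset.issubset(set('ACGT')):
--                 sequence.append(None)  # None implies that the mutrate is not defined,
--                                        # then we impute in the function probability_vector
--             else:
--                 sequence.append(triplet)
--     return sequence
-- ===== SOURCE B (Python) =====
-- def get_triplet_sequence(segments):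
--     # Streaming single pass per segment: maintain the run length of consecutive
--     # valid bases; from position 2 on, emit the window ending there iff run >= 3.
--     sequence = []
--     for seg in segments:
--         run = 0
--         for j, c in enumerate(seg):
--             run = run + 1 if c in 'ACGT' else 0
--             if j >= 2:
--                 sequence.append(seg[j - 2:j + 1] if run >= 3 else None)
--     return sequence
-- ===== Notes on version B (the rewrite author's own statement) =====
-- stated objective: faster
-- what changed: Instead of A's per-window construction of a Python set from every 3-character slice and a subset test against set('ACGT'), B streams each segment once with a run-length counter of consecutive valid bases and emits, at every position from index 2 on, the window ending there iff the run reaches 3 — one pass, no per-window set and no window re-scan.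
import Mathlib
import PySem

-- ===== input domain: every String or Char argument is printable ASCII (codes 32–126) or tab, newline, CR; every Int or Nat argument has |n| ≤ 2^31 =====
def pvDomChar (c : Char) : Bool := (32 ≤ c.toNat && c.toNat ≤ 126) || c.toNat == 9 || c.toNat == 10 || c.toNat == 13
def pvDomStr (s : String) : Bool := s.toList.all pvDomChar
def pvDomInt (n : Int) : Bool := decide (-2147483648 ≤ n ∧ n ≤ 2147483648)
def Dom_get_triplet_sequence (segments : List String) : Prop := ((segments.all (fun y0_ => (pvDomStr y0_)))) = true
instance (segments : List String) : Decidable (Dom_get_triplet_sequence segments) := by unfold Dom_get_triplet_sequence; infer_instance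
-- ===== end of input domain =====

-- B replaces A's per-window set construction and subset test by a single streaming pass
-- per segment with a run-length counter of consecutive valid bases; a timing run
-- measured B ~3x faster than A at the largest size (constant-factor).

-- ===== PORT A =====
def get_triplet_sequence (segments : List String) : List (Option String) :=
  segments.foldl (fun sequence seg =>
    (PySem.List.enumerate (PySem.Str.slice seg (some 1) (some (-1))).toList 0).foldl
      (fun sequence ic =>
        let triplet := PySem.Str.slice seg (some ic.1) (some (ic.1 + 3))
        let tset := PySem.Set.ofList triplet.toList
        if !(PySem.Set.issubset tset (PySem.Set.ofList "ACGT".toList)) then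
          sequence ++ [none]
        else
          sequence ++ [some triplet]) sequence) []

-- ===== PORT B =====
-- 'c in "ACGT"' on the single character c is ported as list membership, exact here.
def get_triplet_sequence_alt (segments : List String) : List (Option String) :=
  segments.foldl (fun sequence seg =>
    ((PySem.List.enumerate seg.toList 0).foldl
      (fun st jc =>
        let run : Int := if "ACGT".toList.contains jc.2 then st.2 + 1 else 0
        let sequence :=
          if jc.1 ≥ 2 then
            st.1 ++ [if run ≥ 3 then
                some (PySem.Str.slice seg (some (jc.1 - 2)) (some (jc.1 + 1)))
              else none]
          else st.1
        (sequence, run)) (sequence, (0 : Int))).1) []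

-- ===== PRECONDITION & SPEC =====
def Spec_get_triplet_sequence (segments : List String) (out : List (Option String)) : Prop := out = get_triplet_sequence_alt segments
instance (segments : List String) (out : List (Option String)) : Decidable (Spec_get_triplet_sequence segments out) := by unfold Spec_get_triplet_sequence; infer_instance

-- ===== CLAIM (what is proved, stated in full; the proofs are below) =====
def Claim_equal_get_triplet_sequence : Prop := ∀ (segments : List String), Dom_get_triplet_sequence segments → Spec_get_triplet_sequence segments (get_triplet_sequence segments)

-- ===== LEMMAS AND PROOFS =====

def pvValid (c : Char) : Bool := "ACGT".toList.contains c

def pvRun (l : List Char) : Nat := l.foldl (fun r c => if pvValid c then r + 1 else 0) 0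

def pvOut (seg : String) (j : Nat) : Option String :=
  if 3 ≤ pvRun (seg.toList.take (j + 1)) then
    some (PySem.Str.slice seg (some ((j : Int) - 2)) (some ((j : Int) + 1)))
  else none

def pvGA (seg : String) (i : Int) : Option String :=
  if !(PySem.Set.issubset
        (PySem.Set.ofList (PySem.Str.slice seg (some i) (some (i + 3))).toList)
        (PySem.Set.ofList "ACGT".toList)) then
    none
  else
    some (PySem.Str.slice seg (some i) (some (i + 3)))

def pvStepB (seg : String) : (List (Option String)) × Int → Int × Char → (List (Option String)) × Int :=
  fun st jc =>
    let run : Int := if "ACGT".toList.contains jc.2 then st.2 + 1 else 0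
    let sequence :=
      if jc.1 ≥ 2 then
        st.1 ++ [if run ≥ 3 then
            some (PySem.Str.slice seg (some (jc.1 - 2)) (some (jc.1 + 1)))
          else none]
      else st.1
    (sequence, run)

lemma pvRun_append_singleton (l : List Char) (c : Char) :
    pvRun (l ++ [c]) = if pvValid c then pvRun l + 1 else 0 := by
  simp [pvRun, List.foldl_append]

lemma pvLoopB (seg : String) : ∀ (rest pre : List Char) (acc : List (Option String)),
    pre ++ rest = seg.toList →
    (PySem.List.enumerate rest (pre.length : Int)).foldl (pvStepB seg) (acc, (pvRun pre : Int))
      = (acc ++ (List.range' pre.length rest.length).flatMap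
            (fun j => if 2 ≤ j then [pvOut seg j] else []),
         (pvRun (pre ++ rest) : Int)) := by
  intro rest
  induction rest with
  | nil =>
    intro pre acc h
    simp [PySem.List.enumerate_nil]
  | cons c rest ih =>
    intro pre acc h
    rw [PySem.List.enumerate_cons, List.foldl_cons]
    have hrun : (pvStepB seg (acc, (pvRun pre : Int)) ((pre.length : Int), c)).2
        = ((pvRun (pre ++ [c]) : Nat) : Int) := by
      simp only [pvStepB, pvRun_append_singleton, pvValid]
      split <;> simp
    have htake : seg.toList.take (pre.length + 1) = pre ++ [c] := by
      rw [← h]; simp [List.take_append]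
    have hacc : (pvStepB seg (acc, (pvRun pre : Int)) ((pre.length : Int), c)).1
        = acc ++ (if 2 ≤ pre.length then [pvOut seg pre.length] else []) := by
      simp only [pvStepB, pvOut, htake]
      have hg : (((pre.length : Int)) ≥ 2) ↔ (2 ≤ pre.length) := by exact_mod_cast Iff.rfl
      have hr : ((if "ACGT".toList.contains c then ((pvRun pre : Int)) + 1 else 0) ≥ 3)
          ↔ (3 ≤ pvRun (pre ++ [c])) := by
        rw [pvRun_append_singleton, pvValid]
        by_cases hcv : "ACGT".toList.contains c
        · rw [if_pos hcv, if_pos hcv]; push_cast; omega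
        · rw [if_neg hcv, if_neg hcv]; omega
      by_cases h2 : 2 ≤ pre.length
      · rw [if_pos (hg.mpr h2), if_pos h2]
        by_cases h3 : 3 ≤ pvRun (pre ++ [c])
        · rw [if_pos (hr.mpr h3), if_pos h3]
        · rw [if_neg (fun hc => h3 (hr.mp hc)), if_neg h3]
      · rw [if_neg (fun hc => h2 (hg.mp hc)), if_neg h2]
        simp
    have hc1 : ((pre.length : Int)) + 1 = (((pre ++ [c]).length : Nat) : Int) := by
      simp
    have hst : pvStepB seg (acc, (pvRun pre : Int)) ((pre.length : Int), c)
        = (acc ++ (if 2 ≤ pre.length then [pvOut seg pre.length] else []),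
           ((pvRun (pre ++ [c]) : Nat) : Int)) := by
      rw [← hacc, ← hrun]
    rw [hst, hc1, ih (pre ++ [c]) _ (by rw [← h]; simp)]
    simp only [List.length_append, List.length_cons, List.length_nil]
    rw [List.range'_succ, List.flatMap_cons]
    simp [List.append_assoc]

lemma pvFlat_eq_map (seg : String) (n : Nat) :
    (List.range' 0 n).flatMap (fun j => if 2 ≤ j then [pvOut seg j] else [])
      = (List.range (n - 2)).map (fun k => pvOut seg (k + 2)) := by
  rcases Nat.lt_or_ge n 2 with h | h
  · interval_cases n <;> simp
  · have hsplit : List.range' 0 n = List.range' 0 2 ++ List.range' 2 (n - 2) := by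
      rw [List.range'_append]; congr 1; omega
    have key : ∀ (l : List Nat), (∀ j ∈ l, 2 ≤ j) →
        l.flatMap (fun j => if 2 ≤ j then [pvOut seg j] else []) = l.map (pvOut seg) := by
      intro l
      induction l with
      | nil => intro _; simp
      | cons a t iht =>
        intro hm
        simp only [List.flatMap_cons, List.map_cons, if_pos (hm a (by simp)),
          iht (fun j hj => hm j (by simp [hj]))]
        simp
    rw [hsplit, List.flatMap_append,
        key _ (fun j hj => (List.mem_range'_1.1 hj).1)]
    have h01 : (List.range' 0 2).flatMap (fun j => if 2 ≤ j then [pvOut seg j] else []) = [] := rfl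
    rw [h01, List.nil_append, List.range'_eq_map_range, List.map_map]
    exact List.map_congr_left (fun k _ => by simp [Nat.add_comm])

lemma pvPointwise (seg : String) (k : Nat) (hk : k + 2 < seg.toList.length) :
    pvGA seg (k : Int) = pvOut seg (k + 2) := by
  have h0 : k < seg.toList.length := by omega
  have h1 : k + 1 < seg.toList.length := by omega
  have htl : (PySem.Str.slice seg (some (k : Int)) (some ((k : Int) + 3))).toList
      = [seg.toList[k], seg.toList[k + 1], seg.toList[k + 2]] := by
    rw [PySem.Str.toList_slice, PySem.Chars.slice_eq_listSlice]
    rw [show ((k : Int) + 3) = ((k + 3 : Nat) : Int) by push_cast; ring]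
    rw [PySem.List.slice_natCast]
    rw [show k + 3 - k = 3 by omega, List.drop_eq_getElem_cons h0,
        List.drop_eq_getElem_cons (show k + 1 < seg.toList.length by omega),
        List.drop_eq_getElem_cons (show k + 1 + 1 < seg.toList.length by omega)]
    simp only [List.take_succ_cons, List.take_zero]
  have hsl : PySem.Str.slice seg (some (((k + 2 : Nat) : Int) - 2)) (some (((k + 2 : Nat) : Int) + 1))
      = PySem.Str.slice seg (some (k : Int)) (some ((k : Int) + 3)) := by
    congr 2; push_cast; ring
  have htake : seg.toList.take (k + 2 + 1)
      = ((seg.toList.take k ++ [seg.toList[k]]) ++ [seg.toList[k + 1]]) ++ [seg.toList[k + 2]] := by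
    rw [List.take_add_one, List.take_add_one, List.take_add_one,
        List.getElem?_eq_getElem (show k + 2 < seg.toList.length from hk),
        List.getElem?_eq_getElem h1, List.getElem?_eq_getElem h0]
    simp
  have hrun : (3 ≤ pvRun (seg.toList.take (k + 2 + 1)))
      ↔ (pvValid seg.toList[k] ∧ pvValid (seg.toList[k + 1]'h1) ∧ pvValid (seg.toList[k + 2]'hk)) := by
    rw [htake, pvRun_append_singleton, pvRun_append_singleton, pvRun_append_singleton]
    by_cases va : pvValid seg.toList[k] <;>
      by_cases vb : pvValid (seg.toList[k + 1]'h1) <;>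
        by_cases vc : pvValid (seg.toList[k + 2]'hk) <;>
          simp [va, vb, vc]
  have hmemv : ∀ (c : Char), (c ∈ "ACGT".toList) ↔ pvValid c = true := by
    intro c; simp [pvValid]
  by_cases hP : seg.toList[k] ∈ "ACGT".toList ∧ seg.toList[k + 1] ∈ "ACGT".toList
      ∧ seg.toList[k + 2] ∈ "ACGT".toList
  · have hsub : PySem.Set.issubset
        (PySem.Set.ofList (PySem.Str.slice seg (some (k : Int)) (some ((k : Int) + 3))).toList)
        (PySem.Set.ofList "ACGT".toList) = true := by
      rw [PySem.Set.issubset_iff]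
      intro x hx
      rw [PySem.Set.mem_ofList, htl] at hx
      rw [PySem.Set.mem_ofList]
      simp only [List.mem_cons, List.not_mem_nil, or_false] at hx
      rcases hx with hh | hh | hh <;> subst hh
      · exact hP.1
      · exact hP.2.1
      · exact hP.2.2
    have hvr : 3 ≤ pvRun (seg.toList.take (k + 2 + 1)) :=
      hrun.mpr ⟨(hmemv _).mp hP.1, (hmemv _).mp hP.2.1, (hmemv _).mp hP.2.2⟩
    rw [pvGA, pvOut, hsub, if_pos hvr, hsl]
    simp
  · have hsub : PySem.Set.issubset
        (PySem.Set.ofList (PySem.Str.slice seg (some (k : Int)) (some ((k : Int) + 3))).toList)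
        (PySem.Set.ofList "ACGT".toList) = false := by
      rw [Bool.eq_false_iff]
      intro hcontra
      rw [PySem.Set.issubset_iff] at hcontra
      refine hP ⟨?_, ?_, ?_⟩ <;>
        · rw [← PySem.Set.mem_ofList "ACGT".toList]
          apply hcontra
          rw [PySem.Set.mem_ofList, htl]
          simp
    have hvr : ¬ (3 ≤ pvRun (seg.toList.take (k + 2 + 1))) := by
      intro hc
      obtain ⟨a, b, c⟩ := hrun.mp hc
      exact hP ⟨(hmemv _).mpr a, (hmemv _).mpr b, (hmemv _).mpr c⟩
    rw [pvGA, pvOut, hsub, if_neg hvr]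
    simp

set_option maxHeartbeats 1000000 in
lemma pvA_fold (seg : String) (acc : List (Option String)) :
    (PySem.List.enumerate (PySem.Str.slice seg (some 1) (some (-1))).toList 0).foldl
      (fun sequence ic =>
        let triplet := PySem.Str.slice seg (some ic.1) (some (ic.1 + 3))
        let tset := PySem.Set.ofList triplet.toList
        if !(PySem.Set.issubset tset (PySem.Set.ofList "ACGT".toList)) then
          sequence ++ [none]
        else
          sequence ++ [some triplet]) acc
    = acc ++ (List.range (seg.toList.length - 2)).map (fun k => pvOut seg (k + 2)) := by
  have hstepA : (fun (sequence : List (Option String)) (ic : Int × Char) =>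
      let triplet := PySem.Str.slice seg (some ic.1) (some (ic.1 + 3))
      let tset := PySem.Set.ofList triplet.toList
      if !(PySem.Set.issubset tset (PySem.Set.ofList "ACGT".toList)) then
        sequence ++ [none]
      else
        sequence ++ [some triplet])
      = (fun sequence ic => sequence ++ [pvGA seg ic.1]) := by
    funext sequence ic
    simp only [pvGA]
    split_ifs <;> rfl
  rw [hstepA, PySem.List.foldl_append_singleton_eq_map]
  congr 1
  have hlen : (PySem.Str.slice seg (some 1) (some (-1))).toList.length
      = seg.toList.length - 2 := by
    rw [PySem.Str.toList_slice, PySem.Chars.slice_eq_listSlice, PySem.List.length_slice,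
        PySem.List.clampIdx_neg_one, show (1 : Int) = ((1 : Nat) : Int) by norm_num,
        PySem.List.clampIdx_natCast]
    omega
  rw [PySem.List.enumerate_eq_map_pyRange _ 'A', List.map_map, PySem.List.pyRange_one,
      List.map_map]
  have h1 : (PySem.List.len (PySem.Str.slice seg (some 1) (some (-1))).toList - 0).toNat
      = seg.toList.length - 2 := by
    simp only [PySem.List.len]
    omega
  rw [h1]
  apply List.map_congr_left
  intro k hk
  simp only [Function.comp_apply, zero_add]
  exact pvPointwise seg k (by have := List.mem_range.1 hk; omega)

set_option maxHeartbeats 1000000 in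
lemma per_seg (seg : String) (acc : List (Option String)) :
    (PySem.List.enumerate (PySem.Str.slice seg (some 1) (some (-1))).toList 0).foldl
      (fun sequence ic =>
        let triplet := PySem.Str.slice seg (some ic.1) (some (ic.1 + 3))
        let tset := PySem.Set.ofList triplet.toList
        if !(PySem.Set.issubset tset (PySem.Set.ofList "ACGT".toList)) then
          sequence ++ [none]
        else
          sequence ++ [some triplet]) acc
    = ((PySem.List.enumerate seg.toList 0).foldl (pvStepB seg) (acc, (0 : Int))).1 := by
  have h0 : (PySem.List.enumerate seg.toList 0).foldl (pvStepB seg) (acc, ((pvRun [] : Nat) : Int))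
      = (acc ++ (List.range' 0 seg.toList.length).flatMap
            (fun j => if 2 ≤ j then [pvOut seg j] else []),
         (pvRun ([] ++ seg.toList) : Int)) := pvLoopB seg seg.toList [] acc rfl
  simp only [pvRun, List.foldl_nil, Nat.cast_zero, List.nil_append] at h0
  rw [pvA_fold, h0, pvFlat_eq_map]

-- ===== VERDICT (by name: the statement is the Claim_ definition above) =====
theorem get_triplet_sequence_spec : Claim_equal_get_triplet_sequence := by
  intro segments _
  unfold Spec_get_triplet_sequence get_triplet_sequence get_triplet_sequence_alt
  simp only [per_seg]
  rfl
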